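-- pv_equiv track=rewrite | github.com/PRAGA-maker/NSH-Hacks | george_moody_challenge_2022_utility_script.py | get_pregnancy_status
-- ===== SOURCE A (Python) =====
-- def get_pregnancy_status(data):
--     is_pregnant = None
--     for l in data.split('\n'):
--         if l.startswith('#Pregnancy status:'):
--             try:
--                 is_pregnant = bool(l.split(': ')[1].strip())
--             except:
--                 pass
--     return is_pregnant
-- ===== SOURCE B (Python) =====
-- def get_pregnancy_status(data):
--     # Return value only; reverse scan with early exit instead of forward overwrite.
--     for l in reversed(data.split('\n')):
--         if l.startswith('#Pregnancy status:'):
--             parts = l.split(': ')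
--             if len(parts) > 1:
--                 return bool(parts[1].strip())
--     return None
-- ===== Notes on version B (the rewrite author's own statement) =====
-- stated objective: alternative
-- what changed: B scans the lines in reverse with an early return at the first matching line whose split succeeds (explicit length test instead of try/except), instead of A's forward pass that overwrites the accumulator on every successful parse.
import Mathlib
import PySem

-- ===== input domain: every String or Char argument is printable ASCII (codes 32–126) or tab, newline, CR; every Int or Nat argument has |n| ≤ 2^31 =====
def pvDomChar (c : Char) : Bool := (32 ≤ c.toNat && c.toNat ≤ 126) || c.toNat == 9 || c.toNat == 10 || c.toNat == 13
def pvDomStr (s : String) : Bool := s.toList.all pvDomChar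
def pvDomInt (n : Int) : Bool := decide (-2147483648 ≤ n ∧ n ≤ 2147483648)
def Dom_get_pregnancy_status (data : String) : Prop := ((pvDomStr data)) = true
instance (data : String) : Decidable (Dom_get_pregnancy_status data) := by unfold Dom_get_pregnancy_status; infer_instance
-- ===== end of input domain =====

-- B differs from A only in decomposition: reverse scan with early return instead of a
-- forward pass overwriting an accumulator; return values agree everywhere (objective: alternative).

-- ===== PORT A =====
-- one iteration of A's forward loop: overwrite the accumulator on a successful parse
-- (l.split(': ')[1] raising IndexError = pyGet? returning none → 'except: pass' keeps acc;
--  bool(s) on a string = s ≠ "")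
def pvAStep (acc : Option Bool) (l : String) : Option Bool :=
  if PySem.Str.startswith l "#Pregnancy status:" then
    match PySem.List.pyGet? ((PySem.Str.split? l ": ").getD []) 1 with
    | some p => some (PySem.Str.strip p != "")
    | none => acc
  else acc

def get_pregnancy_status (data : String) : Option Bool :=
  ((PySem.Str.split? data "\n").getD []).foldl pvAStep none
  -- split? is some here since the separator literals are nonempty; getD [] unwraps it

-- ===== PORT B =====
-- Source B's loop over reversed(data.split('\n')) with early return
def pvBLoop : List String → Option Bool
  | [] => none
  | l :: rest =>
    if PySem.Str.startswith l "#Pregnancy status:" then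
      let parts := (PySem.Str.split? l ": ").getD []
      if parts.length > 1 then some (PySem.Str.strip (parts.getD 1 "") != "")
      else pvBLoop rest
    else pvBLoop rest

def get_pregnancy_status_alt (data : String) : Option Bool :=
  pvBLoop (((PySem.Str.split? data "\n").getD []).reverse)

-- ===== PRECONDITION & SPEC =====
def Spec_get_pregnancy_status (data : String) (out : Option Bool) : Prop := out = get_pregnancy_status_alt data
instance (data : String) (out : Option Bool) : Decidable (Spec_get_pregnancy_status data out) := by unfold Spec_get_pregnancy_status; infer_instance

-- ===== CLAIM (what is proved, stated in full; the proofs are below) =====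
def Claim_equal_get_pregnancy_status : Prop := ∀ (data : String), Dom_get_pregnancy_status data → Spec_get_pregnancy_status data (get_pregnancy_status data)

-- ===== LEMMAS AND PROOFS =====

-- the per-line parse both programs compute when it succeeds
def pvParse (l : String) : Option Bool :=
  if PySem.Str.startswith l "#Pregnancy status:" then
    match PySem.List.pyGet? ((PySem.Str.split? l ": ").getD []) 1 with
    | some p => some (PySem.Str.strip p != "")
    | none => none
  else none

theorem pvAStep_eq (acc : Option Bool) (l : String) :
    pvAStep acc l = (pvParse l).or acc := by
  unfold pvAStep pvParse
  split_ifs with h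
  · cases PySem.List.pyGet? ((PySem.Str.split? l ": ").getD []) 1 <;> simp [Option.or]
  · simp [Option.or]

theorem pvBLoop_cons (l : String) (rest : List String) :
    pvBLoop (l :: rest) = (pvParse l).or (pvBLoop rest) := by
  show (if PySem.Str.startswith l "#Pregnancy status:" then
          let parts := (PySem.Str.split? l ": ").getD []
          if parts.length > 1 then some (PySem.Str.strip (parts.getD 1 "") != "")
          else pvBLoop rest
        else pvBLoop rest) = (pvParse l).or (pvBLoop rest)
  unfold pvParse
  by_cases h : PySem.Str.startswith l "#Pregnancy status:" = true
  · rw [if_pos h, if_pos h]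
    have hg : PySem.List.pyGet? ((PySem.Str.split? l ": ").getD []) 1
        = ((PySem.Str.split? l ": ").getD [])[1]? := by
      exact_mod_cast PySem.List.pyGet?_natCast ((PySem.Str.split? l ": ").getD []) 1
    rw [hg]
    by_cases hlen : ((PySem.Str.split? l ": ").getD []).length > 1
    · have h1 : ((PySem.Str.split? l ": ").getD [])[1]? =
          some (((PySem.Str.split? l ": ").getD []).getD 1 "") := by
        simp [List.getD, List.getElem?_eq_getElem hlen]
      rw [h1]
      simp [hlen, Option.or]
    · have h1 : ((PySem.Str.split? l ": ").getD [])[1]? = none := by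
        simp; omega
      rw [h1]
      simp [hlen, Option.or]
  · rw [if_neg h, if_neg h]
    rfl

theorem pvBLoop_eq_findSome? (ls : List String) : pvBLoop ls = ls.findSome? pvParse := by
  induction ls with
  | nil => rfl
  | cons l rest ih =>
    rw [pvBLoop_cons, List.findSome?_cons, ih]
    cases pvParse l <;> rfl

theorem pvFoldl_eq (ls : List String) (acc : Option Bool) :
    ls.foldl pvAStep acc = (ls.reverse.findSome? pvParse).or acc := by
  induction ls generalizing acc with
  | nil => rfl
  | cons l rest ih =>
    rw [List.foldl_cons, pvAStep_eq, ih, List.reverse_cons, List.findSome?_append,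
      Option.or_assoc]
    cases hp : pvParse l <;> simp [List.findSome?, hp]

-- ===== VERDICT (by name: the statement is the Claim_ definition above) =====
theorem get_pregnancy_status_spec : Claim_equal_get_pregnancy_status := by
  intro data _
  unfold Spec_get_pregnancy_status get_pregnancy_status get_pregnancy_status_alt
  rw [pvFoldl_eq, pvBLoop_eq_findSome?, Option.or_none]
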